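-- pv_equiv track=rewrite | github.com/alannaa/DataScience_LanguagePredictorTool | ds2000P1Alanna.py | langFileDict
-- ===== SOURCE A (Python) =====
-- def langFileDict(langList):
--     langFileDict = {}
--     for line in langList:
--         if (not "Unknown" in line[0] + line[1]):
--             if (not line[0] in langFileDict.keys()):
--                 langFileDict[line[0]] = [line[1]]
--             else:
--                 langFileDict[line[0]].append(line[1])
--     return langFileDict
-- ===== SOURCE B (Python) =====
-- def langFileDict(langList):
--     pairs = [(line[0], line[1]) for line in langList
--              if "Unknown" not in line[0] + line[1]]
--     keys = list(dict.fromkeys(k for k, _ in pairs))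
--     return {k: [v for k2, v in pairs if k2 == k] for k in keys}
-- ===== Notes on version B (the rewrite author's own statement) =====
-- stated objective: alternative
-- what changed: Replaces A's incremental dict insertion/append per line with a two-pass grouping: filter the surviving (key,value) pairs once, dedup the keys in first-encounter order, then build each group by a comprehension over the filtered pairs.
import Mathlib
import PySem

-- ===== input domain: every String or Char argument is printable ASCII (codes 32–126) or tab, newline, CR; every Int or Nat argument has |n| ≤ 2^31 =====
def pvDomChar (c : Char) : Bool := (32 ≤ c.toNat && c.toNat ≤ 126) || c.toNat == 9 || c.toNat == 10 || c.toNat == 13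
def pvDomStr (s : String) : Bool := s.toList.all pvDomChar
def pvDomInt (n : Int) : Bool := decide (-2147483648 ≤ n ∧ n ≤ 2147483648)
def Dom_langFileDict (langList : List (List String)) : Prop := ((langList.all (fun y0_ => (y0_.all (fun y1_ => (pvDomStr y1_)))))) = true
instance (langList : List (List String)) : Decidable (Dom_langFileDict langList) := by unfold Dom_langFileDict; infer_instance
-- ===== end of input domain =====

-- B replaces A's incremental per-line dict insertion/append with a two-pass grouping
-- (filter the surviving pairs once, dedup the keys in first-encounter order, then
-- collect each key's values by a scan over the filtered pairs); objective: alternative.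

-- ===== PORT A =====
-- A: one fold over the lines, building the dict incrementally (insert new key / append to existing).
def langFileDict (langList : List (List String)) : List (String × List String) :=
  (langList.foldl
    (fun d line =>
      if !(PySem.Str.isIn "Unknown" (PySem.List.pyGetD line 0 "" ++ PySem.List.pyGetD line 1 "")) then
        if !(d.contains (PySem.List.pyGetD line 0 "")) then
          d.insert (PySem.List.pyGetD line 0 "") [PySem.List.pyGetD line 1 ""]
        else
          d.modify (PySem.List.pyGetD line 0 "") [] (· ++ [PySem.List.pyGetD line 1 ""])
      else d)
    PySem.Dict.empty).items

-- ===== PORT B =====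
-- B: filter to the surviving (key, value) pairs, dedup the keys in encounter order,
-- then map each key to the values collected by a scan over the filtered pairs.
def langFileDict_alt (langList : List (List String)) : List (String × List String) :=
  let pairs := (langList.filter
      (fun line => !(PySem.Str.isIn "Unknown" (PySem.List.pyGetD line 0 "" ++ PySem.List.pyGetD line 1 "")))).map
      (fun line => (PySem.List.pyGetD line 0 "", PySem.List.pyGetD line 1 ""))
  let keys := PySem.List.dedup (pairs.map Prod.fst)
  keys.map (fun k => (k, (pairs.filter (fun p => p.1 == k)).map Prod.snd))

-- ===== PRECONDITION & SPEC =====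
-- Pre_ excludes exactly the inputs where some line has fewer than two entries:
-- there Python A raises IndexError on line[0]/line[1] (and B raises the same way).
def Pre_langFileDict (langList : List (List String)) : Prop :=
  ∀ line ∈ langList, 2 ≤ line.length
instance (langList : List (List String)) : Decidable (Pre_langFileDict langList) := by unfold Pre_langFileDict; infer_instance

def pvWitness_langFileDict : List (List String) :=
  [["en", "hello"], ["en", "hi"], ["fr", "bonjour"], ["xx", "Unknown lang"]]

def Spec_langFileDict (langList : List (List String)) (out : List (String × List String)) : Prop := out = langFileDict_alt langList
instance (langList : List (List String)) (out : List (String × List String)) : Decidable (Spec_langFileDict langList out) := by unfold Spec_langFileDict; infer_instance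

-- ===== CLAIM (what is proved, stated in full; the proofs are below) =====
def Claim_equal_langFileDict : Prop := ∀ (langList : List (List String)), Dom_langFileDict langList → Pre_langFileDict langList → Spec_langFileDict langList (langFileDict langList)

-- ===== LEMMAS AND PROOFS =====

-- Inserting a fresh key with [v] is the same dict as modify-with-default-append.
theorem pv_insert_eq_modify (d : PySem.Dict String (List String)) (k v : String)
    (h : d.contains k = false) : d.insert k [v] = d.modify k [] (· ++ [v]) := by
  have hg : d.getD k ([] : List String) = [] := PySem.Dict.getD_of_not_contains d [] h
  simp [PySem.Dict.insert, PySem.Dict.modify, h, hg]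

-- A's fold over the raw lines equals a pure modify-fold over B's filtered pairs.
theorem pv_fold_eq_pairs (langList : List (List String)) (d : PySem.Dict String (List String)) :
    langList.foldl
      (fun d line =>
        if !(PySem.Str.isIn "Unknown" (PySem.List.pyGetD line 0 "" ++ PySem.List.pyGetD line 1 "")) then
          if !(d.contains (PySem.List.pyGetD line 0 "")) then
            d.insert (PySem.List.pyGetD line 0 "") [PySem.List.pyGetD line 1 ""]
          else
            d.modify (PySem.List.pyGetD line 0 "") [] (· ++ [PySem.List.pyGetD line 1 ""])
        else d) d
    = ((langList.filter
        (fun line => !(PySem.Str.isIn "Unknown" (PySem.List.pyGetD line 0 "" ++ PySem.List.pyGetD line 1 "")))).map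
        (fun line => (PySem.List.pyGetD line 0 "", PySem.List.pyGetD line 1 ""))).foldl
        (fun d p => d.modify p.1 [] (· ++ [p.2])) d := by
  induction langList generalizing d with
  | nil => rfl
  | cons line rest ih =>
    simp only [List.foldl_cons, List.filter_cons]
    cases hq : PySem.Str.isIn "Unknown" (PySem.List.pyGetD line 0 "" ++ PySem.List.pyGetD line 1 "") with
    | true =>
      simp only [Bool.not_true, Bool.false_eq_true, if_false]
      exact ih d
    | false =>
      simp only [Bool.not_false, if_true, List.map_cons, List.foldl_cons]
      cases hc : d.contains (PySem.List.pyGetD line 0 "") with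
      | true =>
        simp only [Bool.not_true, Bool.false_eq_true, if_false]
        exact ih _
      | false =>
        simp only [Bool.not_false, if_true]
        rw [pv_insert_eq_modify d _ _ hc]
        exact ih _

theorem langFileDict_eq_alt (langList : List (List String)) :
    langFileDict langList = langFileDict_alt langList := by
  unfold langFileDict langFileDict_alt
  rw [pv_fold_eq_pairs]
  set pairs := ((langList.filter
      (fun line => !(PySem.Str.isIn "Unknown" (PySem.List.pyGetD line 0 "" ++ PySem.List.pyGetD line 1 "")))).map
      (fun line => (PySem.List.pyGetD line 0 "", PySem.List.pyGetD line 1 ""))) with hp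
  have hnd : (pairs.foldl (fun d p => d.modify p.1 [] (· ++ [p.2])) PySem.Dict.empty).keys.Nodup := by
    exact PySem.Dict.nodup_keys_foldl_modify_key pairs (fun p => p.1) [] (fun d p => (· ++ [p.2]))
      PySem.Dict.empty (by simp)
  rw [PySem.Dict.items_eq_map_keys _ hnd ([] : List String)]
  have hkeys : (pairs.foldl (fun d p => d.modify p.1 [] (· ++ [p.2])) PySem.Dict.empty).keys
      = PySem.List.dedup (pairs.map Prod.fst) := by
    rw [PySem.Dict.keys_foldl_modify_key]
    simp [PySem.Dict.keys_empty]
    rfl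
  rw [hkeys]
  refine List.map_congr_left (fun k hk => ?_)
  have := PySem.Dict.getD_foldl_modify_append (l := pairs) (d := PySem.Dict.empty) (c := k)
  simp only [PySem.Dict.getD_empty, List.nil_append] at this
  simp [this]

-- ===== VERDICT (by name: the statement is the Claim_ definition above) =====
theorem langFileDict_spec : Claim_equal_langFileDict := by
  intro langList _ _
  unfold Spec_langFileDict
  exact langFileDict_eq_alt langList
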